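-- pv_equiv track=rewrite | github.com/tjacek/realtime_actions | utils/dirs.py | sub_paths
-- ===== SOURCE A (Python) =====
-- def sub_paths(out_path,dirs):
--     dir_path=[]
--     sub_paths=[]
--     for dir_i in dirs:
--         sub_path_i=dir_path + [dir_i]
--         sub_paths.append('/'.join(sub_path_i))
--         dir_path=sub_path_i
--     return sub_paths
-- ===== SOURCE B (Python) =====
-- def sub_paths(out_path, dirs):
--     dirs = list(dirs)
--     return ['/'.join(dirs[:i + 1]) for i in range(len(dirs))]
-- ===== Notes on version B (the rewrite author's own statement) =====
-- stated objective: simpler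
-- what changed: Replaced the growing accumulator loop by a direct comprehension that recomputes each cumulative path as '/'.join(dirs[:i+1]).
import Mathlib
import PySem

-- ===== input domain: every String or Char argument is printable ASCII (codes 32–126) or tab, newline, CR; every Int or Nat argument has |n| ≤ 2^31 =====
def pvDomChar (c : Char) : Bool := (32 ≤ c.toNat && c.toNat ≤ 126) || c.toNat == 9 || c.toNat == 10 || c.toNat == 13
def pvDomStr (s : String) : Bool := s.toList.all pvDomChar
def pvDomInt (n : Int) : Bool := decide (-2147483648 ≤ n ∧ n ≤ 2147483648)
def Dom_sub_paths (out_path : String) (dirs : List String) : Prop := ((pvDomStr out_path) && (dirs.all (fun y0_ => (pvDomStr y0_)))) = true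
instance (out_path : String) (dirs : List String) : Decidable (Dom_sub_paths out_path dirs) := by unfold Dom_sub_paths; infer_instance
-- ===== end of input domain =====

-- B replaces A's growing accumulator with a direct per-index recompute '/'.join(dirs[:i+1]); objective: simpler.


-- ===== PORT A =====
-- A: loop extending dir_path and appending '/'.join of it; state = (dir_path, sub_paths)
def sub_paths (out_path : String) (dirs : List String) : List String :=
  (dirs.foldl
    (fun (st : List String × List String) (dir_i : String) =>
      let sub_path_i := st.1 ++ [dir_i]
      (sub_path_i, st.2 ++ [PySem.Str.join "/" sub_path_i]))
    ([], [])).2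

-- ===== PORT B =====
-- B: for each i in range(len(dirs)), '/'.join(dirs[:i+1])
def sub_paths_alt (out_path : String) (dirs : List String) : List String :=
  (List.range dirs.length).map (fun i => PySem.Str.join "/" (dirs.take (i + 1)))

-- ===== PRECONDITION & SPEC =====
def Spec_sub_paths (out_path : String) (dirs : List String) (out : List String) : Prop := out = sub_paths_alt out_path dirs
instance (out_path : String) (dirs : List String) (out : List String) : Decidable (Spec_sub_paths out_path dirs out) := by unfold Spec_sub_paths; infer_instance

-- ===== CLAIM (what is proved, stated in full; the proofs are below) =====
def Claim_equal_sub_paths : Prop := ∀ (out_path : String) (dirs : List String), Dom_sub_paths out_path dirs → Spec_sub_paths out_path dirs (sub_paths out_path dirs)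

-- ===== LEMMAS AND PROOFS =====
theorem sub_paths_fold_eq (rest acc out : List String) :
    (rest.foldl
      (fun (st : List String × List String) (dir_i : String) =>
        let sub_path_i := st.1 ++ [dir_i]
        (sub_path_i, st.2 ++ [PySem.Str.join "/" sub_path_i]))
      (acc, out)).2
    = out ++ (List.range rest.length).map
        (fun i => PySem.Str.join "/" (acc ++ rest.take (i + 1))) := by
  induction rest generalizing acc out with
  | nil => simp
  | cons d t ih =>
      simp only [List.foldl_cons, ih, List.length_cons, List.range_succ_eq_map,
        List.map_cons, List.map_map, Function.comp_def, List.take_succ_cons,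
        Nat.succ_eq_add_one, List.append_assoc, List.singleton_append]
      simp

-- ===== VERDICT (by name: the statement is the Claim_ definition above) =====
theorem sub_paths_spec : Claim_equal_sub_paths := by
  intro out_path dirs _
  unfold Spec_sub_paths sub_paths sub_paths_alt
  simpa using sub_paths_fold_eq dirs [] []
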